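-- pv_equiv track=rewrite | github.com/smrithikrish/Superset | Superset GUI app.py | makeSuperSetDeck
-- ===== SOURCE A (Python) =====
-- import copy, string, itertools, random
--
-- def stringProduct(L):
--     # This helper function (which is extremely useful for makeSuperSetDeck)
--     # is provided for students, since it uses some concepts we have not
--     # yet covered.  This takes a list of strings and returns a list of
--     # their product -- that is, a list of strings where the first character
--     # is any letter from the first string, the second character is the any
--     # letter from the second string, and so on.
--     # For example:
--     # stringProduct(['AB', 'CDE']) returns ['AC', 'AD', 'AE', 'BC', 'BD', 'BE']
--     # Also:
--     # stringProduct(['AB', 'CD', 'EFG']) returns ['ACE', 'ACF', 'ACG', 'ADE',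
--     #                                             'ADF', 'ADG', 'BCE', 'BCF',
--     #                                             'BCG', 'BDE', 'BDF', 'BDG']
--     resultTuples = list(itertools.product(*L))
--     resultStrings = [''.join(t) for t in resultTuples]
--     return resultStrings
--
-- def makeSuperSetDeck(dims):
--     # This generates all possible cards with the given dimensions
--     # and returns them in a sorted list.
--     # For example, consider makeSuperSetDeck([3,4]):
--     # Here, there are two features:
--     #     * feature0 has 3 features ('A', 'B', or 'C')
--     #     * feature1 has 4 features ('A', 'B', 'C', or 'D')
--     # Each card in the deck includes an option from each feature,
--     # resulting in this deck:
--     # ['AA', 'AB', 'AC', 'AD', 'BA', 'BB', 'BC', 'BD', 'CA', 'CB', 'CC', 'CD']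
--     # Thus, makeSuperSetDeck([3,4]) returns that list.
--     # Hint: use stringProduct() here!
--     letters = ["A", "B", "C", "D", "E"]
--     temp = ""
--     features = []
--     for i in range(len(dims)):
--         for j in range(dims[i]):
--             temp += letters[j]
--         features.append(temp)
--         temp = ""
--     resultStrings = stringProduct(features)
--     return resultStrings
-- ===== SOURCE B (Python) =====
-- def makeSuperSetDeck(dims):
--     # Count-then-decode: the deck size is the product of the dimensions;
--     # card #k is reconstructed from its index by mixed-radix digit
--     # extraction (divmod), with no Cartesian-product iteration at all.
--     letters = "ABCDE"
--     radii = [max(0, d) for d in dims]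
--     total = 1
--     for r in radii:
--         total *= r
--     deck = []
--     for k in range(total):
--         chars = []
--         for r in reversed(radii):
--             k, j = divmod(k, r)
--             chars.append(letters[j])
--         chars.reverse()
--         deck.append(''.join(chars))
--     return deck
-- ===== Notes on version B (the rewrite author's own statement) =====
-- stated objective: alternative
-- what changed: Replaces feature-string construction plus itertools.product with a count-then-decode (ranking) scheme: compute the deck size as the product of the dimensions, then rebuild each card from its index by mixed-radix divmod digit extraction.
import Mathlib
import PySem

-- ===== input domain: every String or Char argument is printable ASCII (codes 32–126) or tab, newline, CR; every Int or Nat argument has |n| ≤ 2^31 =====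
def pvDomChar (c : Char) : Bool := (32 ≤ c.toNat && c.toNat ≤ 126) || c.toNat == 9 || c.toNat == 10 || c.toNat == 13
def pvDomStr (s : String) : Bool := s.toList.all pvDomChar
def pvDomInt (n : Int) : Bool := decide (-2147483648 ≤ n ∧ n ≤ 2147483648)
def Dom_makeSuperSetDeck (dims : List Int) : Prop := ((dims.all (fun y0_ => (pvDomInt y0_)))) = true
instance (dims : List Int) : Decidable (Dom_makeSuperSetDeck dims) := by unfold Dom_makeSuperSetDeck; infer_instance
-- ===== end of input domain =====

-- B replaces feature-strings + itertools.product by count-then-decode: deck size = product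
-- of dims, each card rebuilt from its index by mixed-radix divmod digits (objective: alternative).


-- ===== PORT A =====
-- letters = ["A", "B", "C", "D", "E"]
def pvLetters : List String := ["A", "B", "C", "D", "E"]

-- stringProduct: itertools.product of the strings, each tuple joined by ''.
-- Ported as the standard recursion computing exactly product's tuples in its order,
-- joined: product(f::rest) = [c + t for c in f for t in product(rest)].
def pvStringProduct : List String → List String
  | [] => [""]
  | f :: rest =>
      (f.toList).flatMap (fun c =>
        (pvStringProduct rest).map (fun t => String.ofList (c :: t.toList)))

-- inner loop: for j in range(dims[i]): temp += letters[j]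
-- (letters[j] via pyGetD: Python raises IndexError for dims[i] > 5, excluded by Pre_)
def pvFeature (d : Int) : String :=
  (PySem.List.pyRange 0 d 1).foldl
    (fun s j => s ++ PySem.List.pyGetD pvLetters j "") ""

def makeSuperSetDeck (dims : List Int) : List String :=
  let features := (PySem.List.pyRange 0 (dims.length : Int) 1).foldl
    (fun acc i => acc ++ [pvFeature (PySem.List.pyGetD dims i 0)]) []
  pvStringProduct features

-- ===== PORT B =====
-- inner loop body: k, j = divmod(k, r); chars.append(letters[j])
-- (divmod? none / index out of range only where Python B itself raises, outside Pre_)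
def pvDecodeStep (p : Int × List Char) (r : Int) : Int × List Char :=
  match PySem.Int.divmod? p.1 r with
  | some (q, j) => (q, p.2 ++ [(PySem.Str.pyGet? "ABCDE" j).getD ' '])
  | none => (p.1, p.2)

def makeSuperSetDeck_alt (dims : List Int) : List String :=
  let radii := dims.map (fun d => max 0 d)
  let total := radii.foldl (fun t r => t * r) 1
  (PySem.List.pyRange 0 total 1).foldl
    (fun deck k =>
      deck ++ [String.ofList ((radii.reverse.foldl pvDecodeStep (k, ([] : List Char))).2.reverse)]) []

-- ===== PRECONDITION & SPEC =====
-- Pre_ excludes exactly the inputs on which A raises IndexError (some dimension > 5: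
-- the 5-entry letters table has no 6th letter).
def Pre_makeSuperSetDeck (dims : List Int) : Prop := ∀ d ∈ dims, d ≤ 5
instance (dims : List Int) : Decidable (Pre_makeSuperSetDeck dims) := by
  unfold Pre_makeSuperSetDeck; infer_instance
def pvWitness_makeSuperSetDeck : List Int := [2, 3]

def Spec_makeSuperSetDeck (dims : List Int) (out : List String) : Prop := out = makeSuperSetDeck_alt dims
instance (dims : List Int) (out : List String) : Decidable (Spec_makeSuperSetDeck dims out) := by unfold Spec_makeSuperSetDeck; infer_instance

-- ===== CLAIM (what is proved, stated in full; the proofs are below) =====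
def Claim_equal_makeSuperSetDeck : Prop := ∀ (dims : List Int), Dom_makeSuperSetDeck dims → Pre_makeSuperSetDeck dims → Spec_makeSuperSetDeck dims (makeSuperSetDeck dims)

-- ===== LEMMAS AND PROOFS =====

-- letters[j] as a character of "ABCDE"
def pvLetterAt (j : Nat) : Char := (("ABCDE".toList)[j]?).getD ' '

-- mixed-radix digit extraction, least-significant radix first
def pvDec : List Nat → Nat → List Char
  | [], _ => []
  | r :: rs, k => pvLetterAt (k % r) :: pvDec rs (k / r)

-- A's inner character loop builds the length-d prefix of "ABCDE" (d ≤ 5).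
theorem pvFeature_take (d : Int) (hd : d ≤ 5) :
    pvFeature d = String.ofList ("ABCDE".toList.take (max 0 d).toNat) := by
  by_cases h0 : d ≤ 0
  · have hm : (max 0 d).toNat = 0 := by omega
    rw [pvFeature, PySem.List.pyRange_one_eq_nil (by omega), hm]
    decide
  · have h1 : 1 ≤ d := by omega
    interval_cases d <;> decide

theorem pvTake_eq_map_range (n : Nat) (hn : n ≤ 5) :
    "ABCDE".toList.take n = (List.range n).map pvLetterAt := by
  interval_cases n <;> decide

theorem pvDec_snoc (xs : List Nat) (r : Nat) (k : Nat) :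
    pvDec (xs ++ [r]) k = pvDec xs k ++ [pvLetterAt ((k / xs.prod) % r)] := by
  induction xs generalizing k with
  | nil => simp [pvDec]
  | cons x xs ih =>
      simp only [List.cons_append, pvDec, ih, List.prod_cons, Nat.div_div_eq_div_mul,
        List.cons_append]

theorem pvDec_mod (xs : List Nat) (k : Nat) :
    pvDec xs (k % xs.prod) = pvDec xs k := by
  induction xs generalizing k with
  | nil => rfl
  | cons r rs ih =>
      simp only [pvDec, List.prod_cons]
      rw [Nat.mod_mod_of_dvd k ⟨rs.prod, rfl⟩, Nat.mod_mul_right_div_self, ih]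

theorem pvRange_mul (n P : Nat) :
    List.range (n * P) = (List.range n).flatMap (fun i => (List.range P).map (fun j => i * P + j)) := by
  induction n with
  | zero => simp
  | succ n ih =>
      rw [Nat.succ_mul, List.range_add, ih, List.range_succ, List.flatMap_append]
      simp

theorem pvProduct_eq_decode (ns : List Nat) (h5 : ∀ n ∈ ns, n ≤ 5) :
    pvStringProduct (ns.map (fun n => String.ofList ("ABCDE".toList.take n)))
      = (List.range ns.prod).map (fun k => String.ofList ((pvDec ns.reverse k).reverse)) := by
  induction ns with
  | nil => decide
  | cons n ns ih =>
      simp only [List.map_cons, pvStringProduct, List.prod_cons, List.reverse_cons]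
      rw [ih (fun m hm => h5 m (by simp [hm]))]
      rw [show (String.ofList ("ABCDE".toList.take n)).toList = "ABCDE".toList.take n from by simp]
      rw [pvTake_eq_map_range n (h5 n (by simp))]
      rw [pvRange_mul n ns.prod]
      rw [List.map_flatMap, List.flatMap_map]
      apply List.flatMap_congr
      intro i hi
      rw [List.map_map, List.map_map]
      apply List.map_congr_left
      intro j hj
      have hi' : i < n := List.mem_range.mp hi
      have hj' : j < ns.prod := List.mem_range.mp hj
      have hdiv : (i * ns.prod + j) / ns.prod = i := by
        rw [Nat.add_comm, Nat.add_mul_div_right _ _ (by omega), Nat.div_eq_of_lt hj']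
        omega
      have hmod : (i * ns.prod + j) % ns.prod = j := by
        rw [Nat.add_comm, Nat.add_mul_mod_self_right, Nat.mod_eq_of_lt hj']
      have hdec : pvDec ns.reverse (i * ns.prod + j) = pvDec ns.reverse j := by
        rw [← pvDec_mod ns.reverse (i * ns.prod + j), List.prod_reverse, hmod]
      simp only [Function.comp, pvDec_snoc, List.prod_reverse, hdiv, hdec,
        Nat.mod_eq_of_lt hi', List.reverse_append, List.reverse_cons, List.reverse_nil,
        List.nil_append, List.cons_append]
      rw [show (String.ofList (pvDec ns.reverse j).reverse).toList
            = (pvDec ns.reverse j).reverse from by simp]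

theorem pvFold_dec (ns : List Nat) (hpos : ∀ n ∈ ns, 0 < n) (k : Nat) (cs : List Char) :
    ((List.map (fun n : Nat => (n : Int)) ns).foldl pvDecodeStep ((k : Int), cs)).2 = cs ++ pvDec ns k := by
  induction ns generalizing k cs with
  | nil => simp [pvDec]
  | cons n ns ih =>
      have hn : 0 < n := hpos n (by simp)
      have hdm : PySem.Int.divmod? (k : Int) (n : Int)
          = some (((k / n : Nat) : Int), ((k % n : Nat) : Int)) := by
        simp [PySem.Int.divmod?, Nat.pos_iff_ne_zero.mp hn, Int.fdiv_eq_ediv, Int.fmod_eq_emod]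
      rw [List.map_cons, List.foldl_cons]
      rw [show pvDecodeStep ((k : Int), cs) (n : Int)
            = (((k / n : Nat) : Int), cs ++ [pvLetterAt (k % n)]) from by
        simp [pvDecodeStep, hdm, pvLetterAt]
        rw [← Int.natCast_mod, PySem.List.pyGet?_natCast]]
      rw [ih (fun m hm => hpos m (by simp [hm])) (k / n) _]
      simp [pvDec]

theorem pvFoldl_mul_cast (ns : List Nat) (a : Nat) :
    (List.map (fun n : Nat => (n : Int)) ns).foldl (fun t r => t * r) (a : Int)
      = ((ns.foldl (· * ·) a : Nat) : Int) := by
  induction ns generalizing a with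
  | nil => rfl
  | cons n ns ih =>
      simp only [List.map_cons, List.foldl_cons]
      rw [show (a : Int) * (n : Int) = ((a * n : Nat) : Int) from by push_cast; ring, ih]

-- ===== VERDICT (by name: the statement is the Claim_ definition above) =====
theorem makeSuperSetDeck_spec : Claim_equal_makeSuperSetDeck := by
  intro dims _hDom hPre
  unfold Spec_makeSuperSetDeck
  simp only [makeSuperSetDeck, makeSuperSetDeck_alt]
  rw [PySem.List.foldl_append_singleton_eq_map, List.nil_append]
  have hidx : ((PySem.List.pyRange 0 (dims.length : Int) 1).map
      (fun i => PySem.List.pyGetD dims i 0)) = dims :=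
    PySem.List.map_pyGetD_pyRange_zero dims 0
  have h2 : ((PySem.List.pyRange 0 (dims.length : Int) 1).map
        (fun i => pvFeature (PySem.List.pyGetD dims i 0))) = List.map pvFeature dims := by
    have h3 := congrArg (List.map pvFeature) hidx
    rwa [List.map_map, Function.comp_def] at h3
  have hfeat : ((PySem.List.pyRange 0 (dims.length : Int) 1).map
        (fun i => pvFeature (PySem.List.pyGetD dims i 0)))
      = List.map (fun n => String.ofList ("ABCDE".toList.take n))
          (dims.map (fun d => (max 0 d).toNat)) := by
    rw [h2, List.map_map, Function.comp_def]
    exact List.map_congr_left (fun d hd => pvFeature_take d (hPre d hd))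
  rw [hfeat]
  set ns : List Nat := dims.map (fun d => (max 0 d).toNat) with hns
  have h5 : ∀ n ∈ ns, n ≤ 5 := by
    intro n hn
    rcases List.mem_map.mp hn with ⟨d, hd, rfl⟩
    have := hPre d hd
    omega
  rw [pvProduct_eq_decode ns h5]
  -- B side
  have hrad : dims.map (fun d => max 0 d) = List.map (fun n : Nat => (n : Int)) ns := by
    rw [hns, List.map_map]
    exact List.map_congr_left (fun d _ => by
      simp only [Function.comp]
      omega)
  have htot : List.foldl (fun t r => t * r) (1 : Int) (List.map (fun n : Nat => (n : Int)) ns)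
      = ((ns.prod : Nat) : Int) := by
    rw [show (1 : Int) = ((1 : Nat) : Int) from by norm_num, pvFoldl_mul_cast,
      ← List.prod_eq_foldl]
  rw [hrad, htot, PySem.List.pyRange_zero_nat,
    PySem.List.foldl_append_singleton_eq_map, List.map_map]
  apply List.map_congr_left
  intro k hk
  have hk' : k < ns.prod := List.mem_range.mp hk
  have hpos : ∀ n ∈ ns, 0 < n := by
    intro n hn
    rcases Nat.eq_zero_or_pos n with h0 | h1
    · subst h0
      rw [List.prod_eq_zero hn] at hk'
      omega
    · exact h1
  simp only [Function.comp]
  conv_rhs => rw [← List.map_reverse]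
  rw [pvFold_dec ns.reverse
    (fun n hn => hpos n (List.mem_reverse.mp hn)) k [], List.nil_append]
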